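-- pv_equiv track=rewrite | github.com/CaioOliveiraOFC/ToJ | toj_source/classes.py | xp_for_level
-- ===== SOURCE A (Python) =====
-- def xp_for_level(level):
--     # This function calculates how much xp points are needed to the next level of the player
--     xp_to_level = 0
--     need_to_up = 0
--     if level == 1:
--         # This is only for the first level
--         xp_to_level = (level + 7) * 10
--     else:
--         # Loops through and calculates how much xp points are needed to level up
--         for each_level in range(1, level - 1):
--             need_to_up += (level + 7) * 10
--             xp_to_level += need_to_up
--     return xp_to_level
-- ===== SOURCE B (Python) =====
-- def xp_for_level(level):
--     # Closed-form arithmetic series: the loop adds c, 2c, ..., mc with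
--     # c = (level+7)*10 and m = level-2 iterations (0 when level <= 2).
--     if level == 1:
--         return (level + 7) * 10
--     m = max(level - 2, 0)
--     return (level + 7) * 10 * m * (m + 1) // 2
-- ===== Notes on version B (the rewrite author's own statement) =====
-- stated objective: faster
-- what changed: Replaces the O(level) accumulation loop with the closed-form arithmetic-series sum (level+7)*10*m*(m+1)//2 with m = max(level-2, 0).
import Mathlib
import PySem

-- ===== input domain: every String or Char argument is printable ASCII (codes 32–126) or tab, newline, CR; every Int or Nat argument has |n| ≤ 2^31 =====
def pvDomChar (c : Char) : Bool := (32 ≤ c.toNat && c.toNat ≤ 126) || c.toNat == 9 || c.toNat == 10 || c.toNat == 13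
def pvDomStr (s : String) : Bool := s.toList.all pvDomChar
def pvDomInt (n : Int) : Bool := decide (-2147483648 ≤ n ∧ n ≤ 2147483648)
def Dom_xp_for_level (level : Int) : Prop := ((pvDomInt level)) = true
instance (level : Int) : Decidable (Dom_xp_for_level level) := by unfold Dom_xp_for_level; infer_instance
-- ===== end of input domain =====

-- B replaces A's O(level) accumulation loop with the O(1) arithmetic-series closed form.

-- ===== PORT A =====
def xp_for_level (level : Int) : Int :=
  let xp_to_level : Int := 0
  let need_to_up : Int := 0
  if level == 1 then
    (level + 7) * 10
  else
    ((PySem.List.pyRange 1 (level - 1) 1).foldl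
      (fun (s : Int × Int) _ =>
        (s.1 + (level + 7) * 10, s.2 + (s.1 + (level + 7) * 10)))
      (need_to_up, xp_to_level)).2

-- ===== PORT B =====
def xp_for_level_alt (level : Int) : Int :=
  if level == 1 then
    (level + 7) * 10
  else
    let m := max (level - 2) 0
    PySem.Int.floordiv ((level + 7) * 10 * m * (m + 1)) 2

-- ===== PRECONDITION & SPEC =====
def Spec_xp_for_level (level : Int) (out : Int) : Prop := out = xp_for_level_alt level
instance (level : Int) (out : Int) : Decidable (Spec_xp_for_level level out) := by unfold Spec_xp_for_level; infer_instance

-- ===== CLAIM (what is proved, stated in full; the proofs are below) =====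
def Claim_equal_xp_for_level : Prop := ∀ (level : Int), Dom_xp_for_level level → Spec_xp_for_level level (xp_for_level level)

-- ===== LEMMAS AND PROOFS =====

theorem tri_succ (n : Nat) : (n + 1) * (n + 2) / 2 = n * (n + 1) / 2 + (n + 1) := by
  have h : (n + 1) * (n + 2) = n * (n + 1) + 2 * (n + 1) := by ring
  rw [h, Nat.add_mul_div_left _ _ (by norm_num)]

theorem foldl_arith (c : Int) (l : List Int) : ∀ (need xp : Int),
    (l.foldl (fun (s : Int × Int) _ => (s.1 + c, s.2 + (s.1 + c))) (need, xp)).2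
      = xp + l.length * need + c * ((l.length * (l.length + 1) / 2 : Nat) : Int) := by
  induction l with
  | nil => intro need xp; simp
  | cons a l ih =>
    intro need xp
    have h := ih (need + c) (xp + (need + c))
    simp only [List.foldl_cons, List.length_cons] at h ⊢
    rw [h]
    have ht : ((l.length + 1) * (l.length + 2) / 2 : Nat) = l.length * (l.length + 1) / 2 + (l.length + 1) := tri_succ l.length
    push_cast [ht]
    ring

theorem xp_for_level_spec : Claim_equal_xp_for_level := by
  intro level _
  unfold Spec_xp_for_level xp_for_level xp_for_level_alt
  by_cases h : level = 1
  · simp [h]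
  · simp only [beq_iff_eq, h, if_false]
    set c : Int := (level + 7) * 10 with hc
    rw [foldl_arith c]
    set n : Nat := (1 * ((level - 1 - 1) / 1)).toNat with hn
    have hlen : (PySem.List.pyRange 1 (level - 1) 1).length = (level - 1 - 1).toNat := by
      simp [PySem.List.length_pyRange_one]
    rw [hlen]
    have hm : max (level - 2) 0 = ((level - 1 - 1).toNat : Int) := by
      rw [Int.toNat_eq_max]; ring_nf
    rw [hm]
    set k : Nat := (level - 1 - 1).toNat
    have h2 : (level + 7) * 10 * (k : Int) * ((k : Int) + 1) = 2 * (c * ((k * (k + 1) / 2 : Nat) : Int)) := by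
      have he : (k * (k + 1) / 2 : Nat) * 2 = k * (k + 1) :=
        Nat.div_mul_cancel (Nat.even_mul_succ_self k).two_dvd
      have he' : ((k * (k + 1) / 2 : Nat) : Int) * 2 = (k : Int) * ((k : Int) + 1) := by
        exact_mod_cast congrArg (Nat.cast : Nat → Int) he
      linear_combination (-((level + 7) * 10)) * he'
    rw [h2]
    unfold PySem.Int.floordiv
    rw [Int.mul_fdiv_cancel_left _ (by norm_num)]
    ring
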